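-- pv_equiv track=rewrite | github.com/markolalovic/quantum-circuit | quantum-circuit.py | build_flip_non_zero_matrix
-- ===== SOURCE A (Python) =====
-- import itertools
--
-- def build_zero_matrix(m):
--     # m is the size of matrix
--     ktl = [key for key in list(itertools.product([0,1], repeat=m))]
--     return {key : 0 for key in list(itertools.product(ktl, repeat=2))}
--
-- def build_flip_non_zero_matrix(x0):
--     # assume x0 is represented as a list; example: x = [0,1]
--     # x0 defines f(x): f(x) = 1 if x = x0 else f(x) = 0
--     m = len(x0) + 1
--     flip_non_zero_matrix = build_zero_matrix(m)
--     ktl = [key for key in list(itertools.product([0,1], repeat=m))]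
--     for i in range(0,len(ktl),2):
--         flip_non_zero_matrix[ktl[i], ktl[i+1]] = 1
--         flip_non_zero_matrix[ktl[i+1], ktl[i]] = 1
--
--     # change the zero part of the matrix to identity
--     # because we don't want to flip the zero part of the matrix
--     z0 = [0]*len(x0)
--     flip_non_zero_matrix[tuple(z0) + (0,), tuple(z0) + (0,)] = 1
--     flip_non_zero_matrix[tuple(z0) + (0,), tuple(z0) + (1,)] = 0
--     flip_non_zero_matrix[tuple(z0) + (1,), tuple(z0) + (0,)] = 0
--     flip_non_zero_matrix[tuple(z0) + (1,), tuple(z0) + (1,)] = 1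
--     return flip_non_zero_matrix
-- ===== SOURCE B (Python) =====
-- import itertools
--
-- def build_flip_non_zero_matrix(x0):
--     # One pass: compute each of the 4^m entries directly from its key pair
--     # instead of zero-initialising and overwriting swap/identity entries.
--     m = len(x0) + 1
--     ktl = list(itertools.product([0, 1], repeat=m))
--
--     def entry(a, b):
--         if all(v == 0 for v in a[:-1]):
--             # zero part: identity (do not flip the zero part)
--             return 1 if a == b else 0
--         return 1 if a[:-1] == b[:-1] and a[-1] != b[-1] else 0
--
--     return {(a, b): entry(a, b) for a in ktl for b in ktl}
-- ===== Notes on version B (the rewrite author's own statement) =====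
-- stated objective: simpler
-- what changed: Replaces the zero-initialised dict with two overwrite passes (flip pairs, then the identity override on the zero block) by a single dict comprehension that computes every entry directly from its key pair via a predicate.
import Mathlib
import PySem

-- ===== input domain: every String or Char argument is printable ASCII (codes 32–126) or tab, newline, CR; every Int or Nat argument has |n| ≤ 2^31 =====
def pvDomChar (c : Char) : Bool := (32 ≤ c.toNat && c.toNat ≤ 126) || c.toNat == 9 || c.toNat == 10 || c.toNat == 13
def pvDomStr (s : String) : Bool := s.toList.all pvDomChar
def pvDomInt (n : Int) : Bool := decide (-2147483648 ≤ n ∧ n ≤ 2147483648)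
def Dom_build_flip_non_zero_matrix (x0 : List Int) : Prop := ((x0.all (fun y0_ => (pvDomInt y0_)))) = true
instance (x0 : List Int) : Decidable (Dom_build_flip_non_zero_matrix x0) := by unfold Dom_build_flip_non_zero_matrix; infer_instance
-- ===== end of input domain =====

-- B computes each matrix entry directly from its key pair in one dict comprehension
-- instead of zero-initialising and overwriting (objective: simpler decomposition).

-- ===== PORT A =====
-- hand port of list(itertools.product([0,1], repeat=m)): lexicographic order, last
-- position fastest — exact (used by both Pythons, which call product identically)
def pvBits : Nat → List (List Int)
  | 0 => [[]]
  | n + 1 => (pvBits n).flatMap (fun p => [p ++ [0], p ++ [1]])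

def build_flip_non_zero_matrix (x0 : List Int) : List (List (List Int) × Int) :=
  let m := x0.length + 1
  let ktl := pvBits m
  -- build_zero_matrix(m): {key : 0 for key in product(ktl, repeat=2)}
  let zero : PySem.Dict (List (List Int)) Int :=
    PySem.Dict.ofList ((ktl.flatMap (fun a => ktl.map (fun b => [a, b]))).map (fun k => (k, (0 : Int))))
  let d := (PySem.List.pyRange 0 (PySem.List.len ktl) 2).foldl
    (fun d i =>
      -- ktl[i], ktl[i+1]: always in range (len(ktl) = 2^m is even), so .getD [] is exact
      let a := (PySem.List.pyGet? ktl i).getD []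
      let b := (PySem.List.pyGet? ktl (i + 1)).getD []
      (d.insert [a, b] 1).insert [b, a] 1) zero
  let z0 : List Int := List.replicate x0.length 0
  let d := d.insert [z0 ++ [0], z0 ++ [0]] 1
  let d := d.insert [z0 ++ [0], z0 ++ [1]] 0
  let d := d.insert [z0 ++ [1], z0 ++ [0]] 0
  let d := d.insert [z0 ++ [1], z0 ++ [1]] 1
  d.items

-- ===== PORT B =====
-- entry(a, b) of Source B; a[-1]/b[-1]: a and b are nonempty (length m ≥ 1), so .getD 0 is exact
def pvEntry (a b : List Int) : Int :=
  if (PySem.List.slice a none (some (-1))).all (fun v => v == 0) then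
    (if a == b then 1 else 0)
  else if PySem.List.slice a none (some (-1)) == PySem.List.slice b none (some (-1))
          && (PySem.List.pyGet? a (-1)).getD 0 != (PySem.List.pyGet? b (-1)).getD 0 then 1
  else 0

def build_flip_non_zero_matrix_alt (x0 : List Int) : List (List (List Int) × Int) :=
  let m := x0.length + 1
  let ktl := pvBits m
  (PySem.Dict.ofList (ktl.flatMap (fun a => ktl.map (fun b => ([a, b], pvEntry a b))))).items

-- ===== PRECONDITION & SPEC =====
def Spec_build_flip_non_zero_matrix (x0 : List Int) (out : List (List (List Int) × Int)) : Prop := out = build_flip_non_zero_matrix_alt x0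
instance (x0 : List Int) (out : List (List (List Int) × Int)) : Decidable (Spec_build_flip_non_zero_matrix x0 out) := by unfold Spec_build_flip_non_zero_matrix; infer_instance

-- ===== CLAIM (what is proved, stated in full; the proofs are below) =====
def Claim_equal_build_flip_non_zero_matrix : Prop := ∀ (x0 : List Int), Dom_build_flip_non_zero_matrix x0 → Spec_build_flip_non_zero_matrix x0 (build_flip_non_zero_matrix x0)

-- ===== LEMMAS AND PROOFS =====


-- helpers for the proofs
def pvFlat (P : List (List Int)) : List (List Int) := P.flatMap (fun p => [p ++ [0], p ++ [1]])

def pvPairs (K : List (List Int)) : List (List (List Int)) := K.flatMap (fun a => K.map (fun b => [a, b]))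

def updF (k0 : List (List Int)) (v : Int) (f : List (List Int) → Int) : List (List Int) → Int :=
  fun k => if k = k0 then v else f k

def pairIns (d : PySem.Dict (List (List Int)) Int) (p : List Int) : PySem.Dict (List (List Int)) Int :=
  (d.insert [p ++ [0], p ++ [1]] 1).insert [p ++ [1], p ++ [0]] 1

def floop (f : List (List Int) → Int) (p : List Int) : List (List Int) → Int :=
  updF [p ++ [1], p ++ [0]] 1 (updF [p ++ [0], p ++ [1]] 1 f)

lemma pvBits_succ (n : Nat) : pvBits (n + 1) = pvFlat (pvBits n) := rfl

lemma length_mem_pvBits {n : Nat} {p : List Int} (h : p ∈ pvBits n) : p.length = n := by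
  induction n generalizing p with
  | zero => simp [pvBits] at h; simp [h]
  | succ n ih =>
    simp [pvBits, List.mem_flatMap] at h
    obtain ⟨q, hq, hcase⟩ := h
    rcases hcase with h | h <;> subst h <;> simp [ih hq]

lemma mem_pvFlat {P : List (List Int)} {a : List Int} :
    a ∈ pvFlat P ↔ ∃ p ∈ P, a = p ++ [0] ∨ a = p ++ [1] := by
  simp [pvFlat, List.mem_flatMap]

lemma concat_eq_concat {p q : List Int} {x y : Int} (h : p.length = q.length) :
    p ++ [x] = q ++ [y] ↔ p = q ∧ x = y := by
  constructor
  · intro he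
    have := List.append_inj he h
    simpa using this
  · rintro ⟨rfl, rfl⟩; rfl

lemma nodup_pvFlat {P : List (List Int)} {n : Nat} (hP : P.Nodup)
    (hl : ∀ p ∈ P, p.length = n) : (pvFlat P).Nodup := by
  induction P with
  | nil => simp [pvFlat]
  | cons p P ih =>
    have hpn := hl p (by simp)
    have hP' := (List.nodup_cons.mp hP).2
    have hpP := (List.nodup_cons.mp hP).1
    have hrest : (pvFlat P).Nodup := ih hP' (fun q hq => hl q (by simp [hq]))
    have h01 : p ++ [(0:Int)] ≠ p ++ [1] := by simp
    have hnot : ∀ x : Int, p ++ [x] ∉ pvFlat P := by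
      intro x hx
      rw [mem_pvFlat] at hx
      obtain ⟨q, hq, hc⟩ := hx
      have hqn := hl q (by simp [hq])
      rcases hc with hc | hc <;>
        exact hpP (((concat_eq_concat (hpn.trans hqn.symm)).mp hc).1 ▸ hq)
    show (pvFlat (p :: P)).Nodup
    simp only [pvFlat, List.flatMap_cons]
    simp [List.nodup_cons, h01, hpP]
    exact hrest

lemma nodup_pvBits (n : Nat) : (pvBits n).Nodup := by
  induction n with
  | zero => simp [pvBits]
  | succ n ih => exact nodup_pvFlat ih (fun p hp => length_mem_pvBits hp)

lemma replicate_mem_pvBits (n : Nat) : List.replicate n (0 : Int) ∈ pvBits n := by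
  induction n with
  | zero => simp [pvBits]
  | succ n ih =>
    rw [pvBits_succ, mem_pvFlat]
    exact ⟨List.replicate n 0, ih, Or.inl (by simp [List.replicate_succ'])⟩

lemma nodup_pairs_aux (L K : List (List Int)) (hL : L.Nodup) (hK : K.Nodup) :
    (L.flatMap (fun a => K.map (fun b => [a, b]))).Nodup := by
  induction L with
  | nil => simp
  | cons a L ih =>
    simp only [List.flatMap_cons]
    refine List.Nodup.append ?_ (ih (List.nodup_cons.mp hL).2) ?_
    · exact hK.map (fun b b' h => by simpa using h)
    · intro k hk hk'
      simp only [List.mem_map, List.mem_flatMap] at hk hk'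
      obtain ⟨b, _, rfl⟩ := hk
      obtain ⟨a', ha', b', _, he⟩ := hk'
      simp only [List.cons.injEq] at he
      exact (List.nodup_cons.mp hL).1 (he.1 ▸ ha')

lemma nodup_pvPairs {K : List (List Int)} (hK : K.Nodup) : (pvPairs K).Nodup :=
  nodup_pairs_aux K K hK hK

lemma items_ofList_nodup {κ ν : Type} [BEq κ] [LawfulBEq κ] (l : List (κ × ν))
    (h : (l.map Prod.fst).Nodup) : (PySem.Dict.ofList l).items = l := by
  show (PySem.Dict.empty.update l).items = l
  unfold PySem.Dict.update
  rw [PySem.Dict.items_foldl_insert_fresh l Prod.fst Prod.snd PySem.Dict.empty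
    (fun a _ => PySem.Dict.contains_empty a.1) h]
  simp [PySem.Dict.empty]

lemma items_insert_updF (d : PySem.Dict (List (List Int)) Int) (K : List (List (List Int)))
    (f : List (List Int) → Int) (k0 : List (List Int)) (v : Int) (h0 : k0 ∈ K)
    (hd : d.items = K.map (fun k => (k, f k))) :
    (d.insert k0 v).items = K.map (fun k => (k, updF k0 v f k)) := by
  have hc : d.contains k0 = true := by
    rw [PySem.Dict.contains_iff_mem_keys]
    simp only [PySem.Dict.keys, hd, List.map_map]
    simpa using h0
  rw [PySem.Dict.items_insert_of_contains _ _ hc, hd, List.map_map]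
  apply List.map_congr_left
  intro k hk
  by_cases h : k = k0 <;> simp [updF, h]

lemma foldl_pairIns_items (Q : List (List Int)) (K : List (List (List Int)))
    (f : List (List Int) → Int) (d : PySem.Dict (List (List Int)) Int)
    (hm : ∀ p ∈ Q, [p ++ [0], p ++ [1]] ∈ K ∧ [p ++ [1], p ++ [0]] ∈ K)
    (hd : d.items = K.map (fun k => (k, f k))) :
    (Q.foldl pairIns d).items = K.map (fun k => (k, Q.foldl floop f k)) := by
  induction Q generalizing f d with
  | nil => simpa using hd
  | cons p Q ih =>
    simp only [List.foldl_cons]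
    refine ih (floop f p) _ (fun q hq => hm q (by simp [hq])) ?_
    have h1 := items_insert_updF d K f [p ++ [0], p ++ [1]] 1 (hm p (by simp)).1 hd
    exact items_insert_updF _ K _ [p ++ [1], p ++ [0]] 1 (hm p (by simp)).2 h1

lemma floop_apply (Q : List (List Int)) (f : List (List Int) → Int) (k : List (List Int)) :
    Q.foldl floop f k =
      if ∃ p ∈ Q, k = [p ++ [0], p ++ [1]] ∨ k = [p ++ [1], p ++ [0]] then 1 else f k := by
  induction Q generalizing f with
  | nil => simp
  | cons q Q ih =>
    simp only [List.foldl_cons, ih]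
    by_cases hQ : ∃ p ∈ Q, k = [p ++ [0], p ++ [1]] ∨ k = [p ++ [1], p ++ [0]]
    · rw [if_pos hQ, if_pos]
      obtain ⟨p, hp, hc⟩ := hQ
      exact ⟨p, by simp [hp], hc⟩
    · rw [if_neg hQ]
      by_cases h1 : k = [q ++ [1], q ++ [0]]
      · rw [if_pos ⟨q, by simp, Or.inr h1⟩]; simp [floop, updF, h1]
      · by_cases h0 : k = [q ++ [0], q ++ [1]]
        · rw [if_pos ⟨q, by simp, Or.inl h0⟩]; simp [floop, updF, h0]
        · rw [if_neg ?_]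
          · simp [floop, updF, h0, h1]
          · rintro ⟨p, hp, hc⟩
            simp only [List.mem_cons] at hp
            rcases hp with rfl | hp
            · rcases hc with hc | hc; exact h0 hc; exact h1 hc
            · exact hQ ⟨p, hp, hc⟩

lemma length_pvFlat (P : List (List Int)) : (pvFlat P).length = 2 * P.length := by
  induction P with
  | nil => simp [pvFlat]
  | cons p P ih => simp [pvFlat] at ih ⊢; omega

lemma pvFlat_get (P : List (List Int)) (k : Nat) (h : k < P.length) :
    (pvFlat P)[2 * k]? = some (P[k] ++ [0]) ∧ (pvFlat P)[2 * k + 1]? = some (P[k] ++ [1]) := by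
  induction P generalizing k with
  | nil => simp at h
  | cons p P ih =>
    cases k with
    | zero => simp [pvFlat]
    | succ k =>
      have hk : k < P.length := by simpa using h
      have := ih k hk
      simp only [pvFlat, List.flatMap_cons] at this ⊢
      have e1 : 2 * (k + 1) = 2 * k + 1 + 1 := by omega
      simp [e1, List.getElem?_cons_succ, this.1, this.2]

def pvG (P : List (List Int)) (j : Nat) : List Int :=
  (PySem.List.pyGet? (pvFlat P) (j : Int)).getD []

lemma pvG_get0 (P : List (List Int)) (k : Nat) (h : k < P.length) : pvG P (2 * k) = P[k] ++ [0] := by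
  unfold pvG
  rw [PySem.List.pyGet?_natCast, (pvFlat_get P k h).1]
  rfl

lemma pvG_get1 (P : List (List Int)) (k : Nat) (h : k < P.length) : pvG P (2 * k + 1) = P[k] ++ [1] := by
  unfold pvG
  rw [PySem.List.pyGet?_natCast, (pvFlat_get P k h).2]
  rfl

lemma loop_conv_core (P : List (List Int)) (d : PySem.Dict (List (List Int)) Int) :
    (List.range P.length).foldl (fun d k =>
      (d.insert [pvG P (2 * k), pvG P (2 * k + 1)] 1).insert [pvG P (2 * k + 1), pvG P (2 * k)] 1) d
      = P.foldl pairIns d := by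
  induction P using List.reverseRecOn generalizing d with
  | nil => simp
  | append_singleton Q q ih =>
    have hL : (Q ++ [q]).length = Q.length + 1 := by simp
    rw [hL, List.range_succ, List.foldl_append, List.foldl_append]
    have hcongr : (List.range Q.length).foldl (fun d k =>
        (d.insert [pvG (Q ++ [q]) (2 * k), pvG (Q ++ [q]) (2 * k + 1)] 1).insert
          [pvG (Q ++ [q]) (2 * k + 1), pvG (Q ++ [q]) (2 * k)] 1) d
        = (List.range Q.length).foldl (fun d k =>
        (d.insert [pvG Q (2 * k), pvG Q (2 * k + 1)] 1).insert
          [pvG Q (2 * k + 1), pvG Q (2 * k)] 1) d := by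
      apply PySem.List.foldl_congr_mem
      intro acc k hk
      have hk' : k < Q.length := List.mem_range.mp hk
      have hk'' : k < (Q ++ [q]).length := by simp; omega
      rw [pvG_get0 _ k hk'', pvG_get1 _ k hk'', pvG_get0 _ k hk', pvG_get1 _ k hk',
        List.getElem_append_left hk']
    rw [hcongr, ih]
    have hq : (Q ++ [q])[Q.length] = q := by simp
    simp only [List.foldl_cons, List.foldl_nil]
    rw [pvG_get0 _ Q.length (by simp), pvG_get1 _ Q.length (by simp), hq]
    rfl

lemma pyRange_two (N : Nat) :
    PySem.List.pyRange 0 (2 * (N : Int)) 2 = List.map (fun k : Nat => 2 * (k : Int)) (List.range N) := by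
  rw [PySem.List.pyRange_of_pos 0 (2 * (N : Int)) (by norm_num)]
  have hcount : (if (0:Int) < 2 * N then ((2 * (N:Int) - 0 + 2 - 1) / 2).toNat else 0) = N := by
    by_cases h : (0:Int) < 2 * N
    · rw [if_pos h]
      omega
    · rw [if_neg h]
      omega
  simp only [hcount]
  apply List.map_congr_left
  intro k _
  ring

def pvFfin (n : Nat) : List (List Int) → Int :=
  updF [List.replicate n (0:Int) ++ [1], List.replicate n (0:Int) ++ [1]] 1
    (updF [List.replicate n (0:Int) ++ [1], List.replicate n (0:Int) ++ [0]] 0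
      (updF [List.replicate n (0:Int) ++ [0], List.replicate n (0:Int) ++ [1]] 0
        (updF [List.replicate n (0:Int) ++ [0], List.replicate n (0:Int) ++ [0]] 1
          ((pvBits n).foldl floop (fun _ => 0)))))

lemma mem_pvFlat' {P : List (List Int)} {a : List Int} (h : a ∈ pvFlat P) :
    ∃ p ∈ P, ∃ x : Int, (x = 0 ∨ x = 1) ∧ a = p ++ [x] := by
  rw [mem_pvFlat] at h
  obtain ⟨p, hp, h | h⟩ := h
  · exact ⟨p, hp, 0, Or.inl rfl, h⟩
  · exact ⟨p, hp, 1, Or.inr rfl, h⟩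

lemma all_zero_iff {p : List Int} {n : Nat} (hp : p.length = n) :
    (p.all (fun v => v == 0)) = true ↔ p = List.replicate n (0:Int) := by
  rw [List.eq_replicate_iff]
  simp [List.all_eq_true, hp]

lemma pvEntry_concat (p q : List Int) (x y : Int) :
    pvEntry (p ++ [x]) (q ++ [y]) =
      if p.all (fun v => v == 0) then (if p ++ [x] = q ++ [y] then 1 else 0)
      else if p = q ∧ x ≠ y then 1 else 0 := by
  unfold pvEntry
  rw [PySem.List.slice_to_neg_one, PySem.List.slice_to_neg_one,
    PySem.List.pyGet?_neg_one, PySem.List.pyGet?_neg_one]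
  simp only [List.dropLast_concat, List.getLast?_concat, Option.getD_some]
  by_cases hz : (p.all (fun v => v == 0)) = true
  · simp [hz]
  · simp only [hz, Bool.false_eq_true, if_false]
    by_cases hpq : p = q
    · by_cases hxy : x = y <;> simp [hpq, hxy]
    · simp [hpq]

lemma loop_cond {n : Nat} {p q : List Int} {x y : Int} (hp : p ∈ pvBits n)
    (hqn : q.length = n) :
    (∃ p' ∈ pvBits n, [p ++ [x], q ++ [y]] = [p' ++ [0], p' ++ [1]] ∨
        [p ++ [x], q ++ [y]] = [p' ++ [1], p' ++ [0]]) ↔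
      (p = q ∧ ((x = 0 ∧ y = 1) ∨ (x = 1 ∧ y = 0))) := by
  have hpn := length_mem_pvBits hp
  constructor
  · rintro ⟨p', hp', hc | hc⟩ <;>
    · have hpn' := length_mem_pvBits hp'
      simp only [List.cons.injEq, and_true] at hc
      obtain ⟨h1, h2⟩ := hc
      obtain ⟨rfl, rfl⟩ := (concat_eq_concat (hpn.trans hpn'.symm)).mp h1
      obtain ⟨rfl, rfl⟩ := (concat_eq_concat (hqn.trans hpn'.symm)).mp h2
      simp
  · rintro ⟨rfl, ⟨rfl, rfl⟩ | ⟨rfl, rfl⟩⟩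
    · exact ⟨p, hp, Or.inl rfl⟩
    · exact ⟨p, hp, Or.inr rfl⟩

lemma pointwise (n : Nat) (a b : List Int) (ha : a ∈ pvBits (n + 1)) (hb : b ∈ pvBits (n + 1)) :
    pvFfin n [a, b] = pvEntry a b := by
  rw [pvBits_succ] at ha hb
  obtain ⟨p, hp, x, hx, rfl⟩ := mem_pvFlat' ha
  obtain ⟨q, hq, y, hy, rfl⟩ := mem_pvFlat' hb
  have hpn := length_mem_pvBits hp
  have hqn := length_mem_pvBits hq
  have hzn : (List.replicate n (0:Int)).length = n := by simp
  have ceq : ∀ (r s : List Int) (u v : Int), r.length = n → s.length = n →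
      (r ++ [u] = s ++ [v] ↔ r = s ∧ u = v) := by
    intro r s u v hr hs; exact concat_eq_concat (hr.trans hs.symm)
  rw [pvEntry_concat]
  unfold pvFfin updF
  rw [floop_apply]
  simp only [loop_cond hp hqn]
  simp only [all_zero_iff hpn, List.cons.injEq, and_true]
  by_cases hpz : p = List.replicate n (0:Int)
  · subst hpz
    by_cases hqz : q = List.replicate n (0:Int)
    · subst hqz
      rcases hx with rfl | rfl <;> rcases hy with rfl | rfl <;>
        simp [ceq _ _ _ _ hpn hqn]
    · have h2 : ∀ v e : Int, ¬(q ++ [v] = List.replicate n (0:Int) ++ [e]) := by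
        intro v e h; exact hqz ((ceq _ _ _ _ hqn hzn).mp h).1
      have hne : ¬(List.replicate n (0:Int) ++ [x] = q ++ [y]) := by
        intro h; exact hqz (((ceq _ _ _ _ hpn hqn).mp h).1).symm
      have hne' : ¬(List.replicate n (0:Int) = q) := fun h => hqz h.symm
      simp [h2, hne, hne']
  · have h1 : ∀ v e : Int, ¬(p ++ [v] = List.replicate n (0:Int) ++ [e]) := by
      intro v e h; exact hpz ((ceq _ _ _ _ hpn hzn).mp h).1
    simp only [h1, false_and, if_false, hpz]
    rcases hx with rfl | rfl <;> rcases hy with rfl | rfl <;> simp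

lemma flatMap_congr_mem {α β : Type} (l : List α) {f g : α → List β}
    (h : ∀ a ∈ l, f a = g a) : l.flatMap f = l.flatMap g := by
  induction l with
  | nil => rfl
  | cons a l ih =>
    simp only [List.flatMap_cons]
    rw [h a (by simp), ih (fun a ha => h a (by simp [ha]))]

lemma mem_pvPairs {K : List (List Int)} {a b : List Int} (ha : a ∈ K) (hb : b ∈ K) :
    [a, b] ∈ pvPairs K := by
  simp only [pvPairs, List.mem_flatMap, List.mem_map]
  exact ⟨a, ha, b, hb, rfl⟩

lemma main_eq (x0 : List Int) : build_flip_non_zero_matrix x0 = build_flip_non_zero_matrix_alt x0 := by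
  simp only [build_flip_non_zero_matrix, build_flip_non_zero_matrix_alt]
  rw [pvBits_succ x0.length]
  set P := pvBits x0.length with hP
  set K := pvFlat P with hKdef
  have hnodK : K.Nodup := nodup_pvFlat (nodup_pvBits x0.length) (fun p hp => length_mem_pvBits hp)
  -- B side
  have hBkeys : ((K.flatMap (fun a => K.map (fun b => ([a, b], pvEntry a b)))).map Prod.fst).Nodup := by
    have : (K.flatMap (fun a => K.map (fun b => ([a, b], pvEntry a b)))).map Prod.fst = pvPairs K := by
      simp [pvPairs, List.map_flatMap, List.map_map, Function.comp_def]
    rw [this]; exact nodup_pvPairs hnodK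
  rw [items_ofList_nodup _ hBkeys]
  -- A side: items of the zero dict
  have hzeroKeys : (((pvPairs K).map (fun k => (k, (0:Int)))).map Prod.fst).Nodup := by
    have : ((pvPairs K).map (fun k => (k, (0:Int)))).map Prod.fst = pvPairs K := by
      simp [List.map_map, Function.comp_def]
    rw [this]; exact nodup_pvPairs hnodK
  have hpairs : K.flatMap (fun a => K.map (fun b => [a, b])) = pvPairs K := rfl
  rw [hpairs]
  have hlen : PySem.List.len K = 2 * ((P.length : Nat) : Int) := by
    simp [hKdef, length_pvFlat]
  rw [hlen, pyRange_two, List.foldl_map]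
  have hloop : ∀ d : PySem.Dict (List (List Int)) Int,
      (List.range P.length).foldl (fun d (k : Nat) =>
        (d.insert [(PySem.List.pyGet? K (2 * (k : Int))).getD [],
                   (PySem.List.pyGet? K (2 * (k : Int) + 1)).getD []] 1).insert
          [(PySem.List.pyGet? K (2 * (k : Int) + 1)).getD [],
           (PySem.List.pyGet? K (2 * (k : Int))).getD []] 1) d
      = P.foldl pairIns d := by
    intro d
    rw [← loop_conv_core P d]
    apply PySem.List.foldl_congr_mem
    intro acc k hk
    have e0 : (2 * (k : Int)) = ((2 * k : Nat) : Int) := by push_cast; ring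
    have e1 : ((2 * k : Nat) : Int) + 1 = ((2 * k + 1 : Nat) : Int) := by push_cast; ring
    rw [e0, e1]
    rfl
  rw [hloop]
  have hz : List.replicate x0.length (0:Int) ∈ P := replicate_mem_pvBits x0.length
  have hmemK : ∀ p ∈ P, p ++ [(0:Int)] ∈ K ∧ p ++ [(1:Int)] ∈ K := fun p hp =>
    ⟨mem_pvFlat.mpr ⟨p, hp, Or.inl rfl⟩, mem_pvFlat.mpr ⟨p, hp, Or.inr rfl⟩⟩
  have h0 : (PySem.Dict.ofList ((pvPairs K).map (fun k => (k, (0:Int))))).items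
      = (pvPairs K).map (fun k => (k, (fun _ : List (List Int) => (0:Int)) k)) := by
    rw [items_ofList_nodup _ hzeroKeys]
  have hfold := foldl_pairIns_items P (pvPairs K) (fun _ => 0) _
    (fun p hp => ⟨mem_pvPairs (hmemK p hp).1 (hmemK p hp).2,
                  mem_pvPairs (hmemK p hp).2 (hmemK p hp).1⟩) h0
  have hk0 := (hmemK _ hz).1
  have hk1 := (hmemK _ hz).2
  have i1 := items_insert_updF _ (pvPairs K) _
    [List.replicate x0.length (0:Int) ++ [0], List.replicate x0.length (0:Int) ++ [0]] 1
    (mem_pvPairs hk0 hk0) hfold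
  have i2 := items_insert_updF _ (pvPairs K) _
    [List.replicate x0.length (0:Int) ++ [0], List.replicate x0.length (0:Int) ++ [1]] 0
    (mem_pvPairs hk0 hk1) i1
  have i3 := items_insert_updF _ (pvPairs K) _
    [List.replicate x0.length (0:Int) ++ [1], List.replicate x0.length (0:Int) ++ [0]] 0
    (mem_pvPairs hk1 hk0) i2
  have i4 := items_insert_updF _ (pvPairs K) _
    [List.replicate x0.length (0:Int) ++ [1], List.replicate x0.length (0:Int) ++ [1]] 1
    (mem_pvPairs hk1 hk1) i3
  rw [i4]
  show (pvPairs K).map (fun k => (k, pvFfin x0.length k))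
      = K.flatMap (fun a => K.map (fun b => ([a, b], pvEntry a b)))
  rw [← hpairs, List.map_flatMap]
  apply flatMap_congr_mem
  intro a ha
  rw [List.map_map]
  apply List.map_congr_left
  intro b hb
  simp only [Function.comp_def]
  rw [pointwise x0.length a b ha hb]

-- ===== VERDICT (by name: the statement is the Claim_ definition above) =====
theorem build_flip_non_zero_matrix_spec : Claim_equal_build_flip_non_zero_matrix := by
  intro x0 _
  unfold Spec_build_flip_non_zero_matrix
  exact main_eq x0
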